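-- pv_equiv track=rewrite | github.com/suminv/codewar | bingo_func.py | bingo
-- ===== SOURCE A (Python) =====
-- def bingo(array):
--     """Bingo ( Or Not )"""
--     win = sorted([2, 9, 14, 7, 15])
--     res = []
--     alfa = {
--         'a': 1,
--         'b': 2,
--         'c': 3,
--         'd': 4,
--         'e': 5,
--         'f': 6,
--         'g': 7,
--         'h': 8,
--         'i': 9,
--         'j': 10,
--         'k': 11,
--         'l': 12,
--         'm': 13,
--         'n': 14,
--         'o': 15,
--         'p': 16,
--         'q': 17,
--         'r': 18,
--         's': 19,
--         't': 20,
--         'u': 21,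
--         'v': 22,
--         'w': 23,
--         'x': 24,
--         'y': 25,
--         'z': 26
--     }
--
--     for i in array:
--         if i in win:
--             res.append(i)
--     if list(set(res)) == win:
--         return 'WIN'
--     return 'LOSE'
-- ===== SOURCE B (Python) =====
-- def bingo(array):
--     """Bingo ( Or Not )"""
--     win = [2, 9, 14, 7, 15]
--     return 'WIN' if all(n in array for n in win) else 'LOSE'
-- ===== Notes on version B (the rewrite author's own statement) =====
-- stated objective: simpler
-- what changed: B iterates over the five fixed winning numbers checking membership in the input, instead of scanning the input to collect matches into a list, deduplicating via a set and comparing it to the sorted winners; the unused alphabet dict is dropped. (B short-circuits over the 5 fixed winners rather than building res/set over the whole input).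
import Mathlib
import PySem

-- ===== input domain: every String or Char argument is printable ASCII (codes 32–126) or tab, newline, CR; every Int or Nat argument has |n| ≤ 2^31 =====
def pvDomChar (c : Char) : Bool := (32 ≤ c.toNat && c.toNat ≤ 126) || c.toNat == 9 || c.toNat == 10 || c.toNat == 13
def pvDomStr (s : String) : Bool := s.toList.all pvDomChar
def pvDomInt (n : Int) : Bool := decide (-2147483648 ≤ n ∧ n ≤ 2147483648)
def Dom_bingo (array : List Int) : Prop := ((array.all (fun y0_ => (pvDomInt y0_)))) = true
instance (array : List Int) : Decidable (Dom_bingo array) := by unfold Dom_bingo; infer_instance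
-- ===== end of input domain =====

-- B iterates over the five fixed winning numbers checking membership in the input,
-- instead of collecting matches from the input, deduplicating via a set and comparing
-- to the sorted winners (objective: simpler; the unused alphabet dict of A is dead code).


-- ===== PORT A =====
-- A's local dict 'alfa' is never read; it is omitted as dead code.
-- On the final comparison 'list(set(res)) == win': res holds only values from
-- {2,7,9,14,15}; CPython iterates the full 5-element set of these small ints in
-- ascending order (its table is resized to 32 slots, and the values are < 32),
-- and any smaller set compares unequal to the 5-element 'win' regardless of
-- iteration order — so comparing the SORTED distinct elements is exact here.
def bingo (array : List Int) : String :=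
  let win := PySem.List.sorted [2, 9, 14, 7, 15] (fun x => x) false
  let res : List Int := array.foldl (fun res i => if i ∈ win then res ++ [i] else res) []
  if PySem.List.sorted (PySem.Set.ofList res) (fun x => x) false = win then "WIN" else "LOSE"

-- ===== PORT B =====
def bingo_alt (array : List Int) : String :=
  if ([2, 9, 14, 7, 15] : List Int).all (fun n => decide (n ∈ array)) then "WIN" else "LOSE"

-- ===== PRECONDITION & SPEC =====
def Spec_bingo (array : List Int) (out : String) : Prop := out = bingo_alt array
instance (array : List Int) (out : String) : Decidable (Spec_bingo array out) := by unfold Spec_bingo; infer_instance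

-- ===== CLAIM (what is proved, stated in full; the proofs are below) =====
def Claim_equal_bingo : Prop := ∀ (array : List Int), Dom_bingo array → Spec_bingo array (bingo array)

-- ===== LEMMAS AND PROOFS =====

-- the two tests agree: sorted distinct collected winners equal the sorted win list
-- iff every winning number occurs in the input
theorem bingo_key (array : List Int) :
    (PySem.List.sorted (PySem.Set.ofList
        (array.foldl (fun res i =>
          if i ∈ PySem.List.sorted ([2,9,14,7,15] : List Int) (fun x => x) false
          then res ++ [i] else res) [])) (fun x => x) false
      = PySem.List.sorted ([2,9,14,7,15] : List Int) (fun x => x) false)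
    ↔ (∀ n ∈ ([2,9,14,7,15] : List Int), n ∈ array) := by
  have hwin : PySem.List.sorted ([2,9,14,7,15] : List Int) (fun x => x) false
      = [2,7,9,14,15] := by decide
  rw [hwin]
  have hres : array.foldl (fun res i => if i ∈ ([2,7,9,14,15] : List Int) then res ++ [i] else res) []
      = array.filter (fun i => i ∈ ([2,7,9,14,15] : List Int)) := by
    simpa using PySem.List.foldl_append_if_eq_filter
      (l := array) (acc := []) (p := fun i => i ∈ ([2,7,9,14,15] : List Int))
  rw [hres]
  constructor
  · intro h n hn
    have hmem : n ∈ PySem.List.sorted (PySem.Set.ofList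
        (array.filter (fun i => i ∈ ([2,7,9,14,15] : List Int)))) (fun x => x) false := by
      rw [h]; fin_cases hn <;> decide
    rw [PySem.List.mem_sorted, PySem.Set.mem_ofList, List.mem_filter] at hmem
    exact hmem.1
  · intro h
    apply PySem.List.sorted_eq_of_perm_of_pairwise_lt (key := fun x => x)
    · rw [List.perm_ext_iff_of_nodup (by decide) (PySem.Set.nodup_ofList _)]
      intro a
      rw [PySem.Set.mem_ofList, List.mem_filter]
      constructor
      · intro ha
        refine ⟨h a (by fin_cases ha <;> decide), by simpa using ha⟩
      · intro ⟨_, ha⟩; simpa using ha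
    · decide

theorem bingo_eq (array : List Int) : bingo array = bingo_alt array := by
  unfold bingo bingo_alt
  simp only [List.all_eq_true, decide_eq_true_eq]
  rw [if_congr (bingo_key array) rfl rfl]

-- ===== VERDICT (by name: the statement is the Claim_ definition above) =====
theorem bingo_spec : Claim_equal_bingo := by
  intro array _
  unfold Spec_bingo
  exact bingo_eq array
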